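-- pv_equiv track=rewrite | github.com/IvayloSavov/Advanced | Multidimensional_Lists_Exercise/Miner.py | count_coals_and_start_position
-- ===== SOURCE A (Python) =====
-- def count_coals_and_start_position(field, size):  # count coals in field and return starting position
--     coals_count = 0
--     start = None
--     for i in range(size):
--         for j in range(size):
--             if field[i][j] == "c":
--                 coals_count += 1
--             elif field[i][j] == "s":
--                 start = (i, j)
--     return coals_count, start
-- ===== SOURCE B (Python) =====
-- def count_coals_and_start_position(field, size):
--     if size <= 0:
--         return 0, None
--     coals = sum(row[:size].count("c") for row in field[:size])
--     start = None
--     for i in range(size - 1, -1, -1):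
--         row = field[i]
--         for j in range(size - 1, -1, -1):
--             if row[j] == "s":
--                 start = (i, j)
--                 break
--         if start is not None:
--             break
--     return coals, start
-- ===== Notes on version B (the rewrite author's own statement) =====
-- stated objective: alternative
-- what changed: A's single fused nested index loop is split into two differently-shaped passes: a slice-and-count pass (sum of row[:size].count('c') over field[:size]) for the coal total, and a separate backward scan with early exit (range(size-1,-1,-1) with break) that finds the last 's' in row-major order.
import Mathlib
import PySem

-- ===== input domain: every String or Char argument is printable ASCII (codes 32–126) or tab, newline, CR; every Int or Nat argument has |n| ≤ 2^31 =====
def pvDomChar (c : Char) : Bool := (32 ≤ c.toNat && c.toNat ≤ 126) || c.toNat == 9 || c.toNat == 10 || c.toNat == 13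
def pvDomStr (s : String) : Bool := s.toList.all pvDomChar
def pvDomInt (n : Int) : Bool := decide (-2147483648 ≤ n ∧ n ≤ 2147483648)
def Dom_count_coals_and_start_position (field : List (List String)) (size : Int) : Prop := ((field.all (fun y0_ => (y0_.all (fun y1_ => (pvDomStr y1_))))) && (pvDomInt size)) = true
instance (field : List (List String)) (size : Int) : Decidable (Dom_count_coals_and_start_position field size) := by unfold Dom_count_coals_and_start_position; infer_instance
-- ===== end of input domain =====

-- B replaces A's single fused nested loop by two separate passes — a slice-and-count pass for
-- the coal total and a backward scan with early exit for the last 's' — same values, no speed claim.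

-- ===== PORT A =====
def count_coals_and_start_position (field : List (List String)) (size : Int) : Int × (Option (Int × Int)) :=
  (PySem.List.pyRange 0 size 1).foldl (fun st i =>
    (PySem.List.pyRange 0 size 1).foldl (fun st j =>
      -- field[i][j]: pyGetD is exact under Pre_ (indices in range)
      if PySem.List.pyGetD (PySem.List.pyGetD field i []) j "" == "c" then (st.1 + 1, st.2)
      else if PySem.List.pyGetD (PySem.List.pyGetD field i []) j "" == "s" then (st.1, some (i, j))
      else st) st) (0, none)

-- ===== PORT B =====
-- 'for … in range(size-1,-1,-1): … break' = first hit of the countdown scan = findSome?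
def count_coals_and_start_position_alt (field : List (List String)) (size : Int) : Int × (Option (Int × Int)) :=
  if size ≤ 0 then (0, none)
  else
    (((PySem.List.slice field none (some size)).map
        (fun row => ((PySem.List.slice row none (some size)).count "c" : Int))).sum,
     (PySem.List.pyRange (size - 1) (-1) (-1)).findSome? (fun i =>
        let row := PySem.List.pyGetD field i []
        (PySem.List.pyRange (size - 1) (-1) (-1)).findSome? (fun j =>
          if PySem.List.pyGetD row j "" == "s" then some (i, j) else none)))

-- ===== PRECONDITION & SPEC =====
-- Pre_ excludes exactly the inputs on which A raises IndexError: a positive size larger than the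
-- number of rows, or one of the first `size` rows shorter than `size`.
def Pre_count_coals_and_start_position (field : List (List String)) (size : Int) : Prop :=
  size ≤ (field.length : Int) ∧ ∀ row ∈ field.take size.toNat, size ≤ (row.length : Int)
instance (field : List (List String)) (size : Int) : Decidable (Pre_count_coals_and_start_position field size) := by unfold Pre_count_coals_and_start_position; infer_instance

def pvWitness_count_coals_and_start_position : List (List String) × Int := ([["s", "c"], ["c", "x"]], 2)

def Spec_count_coals_and_start_position (field : List (List String)) (size : Int) (out : Int × (Option (Int × Int))) : Prop := out = count_coals_and_start_position_alt field size
instance (field : List (List String)) (size : Int) (out : Int × (Option (Int × Int))) : Decidable (Spec_count_coals_and_start_position field size out) := by unfold Spec_count_coals_and_start_position; infer_instance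

-- ===== CLAIM (what is proved, stated in full; the proofs are below) =====
def Claim_equal_count_coals_and_start_position : Prop := ∀ (field : List (List String)) (size : Int), Dom_count_coals_and_start_position field size → Pre_count_coals_and_start_position field size → Spec_count_coals_and_start_position field size (count_coals_and_start_position field size)

-- ===== LEMMAS AND PROOFS =====

-- the cell A and B both read, and the row-major list of coordinates A visits
def pvCell (field : List (List String)) (p : Int × Int) : String :=
  PySem.List.pyGetD (PySem.List.pyGetD field p.1 []) p.2 ""

def pvPairs (size : Int) : List (Int × Int) :=
  (PySem.List.pyRange 0 size 1).flatMap (fun i => (PySem.List.pyRange 0 size 1).map (fun j => (i, j)))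

-- A's fused loop body over an arbitrary list of coordinates: the two components decouple
theorem pvStepFoldl (field : List (List String)) (P : List (Int × Int)) (st : Int × Option (Int × Int)) :
    P.foldl (fun st p =>
      if pvCell field p == "c" then (st.1 + 1, st.2)
      else if pvCell field p == "s" then (st.1, some p)
      else st) st
    = (st.1 + (P.countP (fun p => pvCell field p == "c") : Int),
       match P.reverse.findSome? (fun p => if pvCell field p == "s" then some p else none) with
       | some p => some p
       | none => st.2) := by
  induction P generalizing st with
  | nil => simp
  | cons p t ih =>
    simp only [List.foldl_cons, List.reverse_cons, List.findSome?_append, List.countP_cons]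
    rw [ih]
    by_cases hc : pvCell field p == "c"
    · have hs : ¬ (pvCell field p == "s") := by
        simp only [beq_iff_eq] at hc ⊢; simp [hc]
      rcases hfs : t.reverse.findSome? (fun p => if pvCell field p == "s" then some p else none) with _ | q
      · simp [hc, hs, List.findSome?]; omega
      · simp [hc]; omega
    · by_cases hs : pvCell field p == "s"
      · rcases hfs : t.reverse.findSome? (fun p => if pvCell field p == "s" then some p else none) with _ | q
        · simp [hc, hs, List.findSome?]
        · simp [hc, hs]
      · rcases hfs : t.reverse.findSome? (fun p => if pvCell field p == "s" then some p else none) with _ | q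
        · simp [hc, hs, List.findSome?]
        · simp [hc, hs]

-- A as count + last-'s' over pvPairs
theorem pvA_char (field : List (List String)) (size : Int) :
    count_coals_and_start_position field size
    = (((pvPairs size).countP (fun p => pvCell field p == "c") : Int),
       (pvPairs size).reverse.findSome? (fun p => if pvCell field p == "s" then some p else none)) := by
  have h1 : count_coals_and_start_position field size
      = (pvPairs size).foldl (fun st p =>
          if pvCell field p == "c" then (st.1 + 1, st.2)
          else if pvCell field p == "s" then (st.1, some p)
          else st) (0, none) := by
    unfold count_coals_and_start_position pvPairs
    rw [List.foldl_flatMap]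
    refine PySem.List.foldl_congr_mem _ _ _ _ ?_
    intro acc i _
    rw [List.foldl_map]
    rfl
  rw [h1, pvStepFoldl]
  rcases hfs : ((pvPairs size).reverse.findSome?
      fun p => if pvCell field p == "s" then some p else none) with _ | q <;> simp

theorem pvTakeMap {α : Type} (xs : List α) (d : α) (n : Nat) (hn : n ≤ xs.length) :
    (List.range n).map (fun (k : Nat) => PySem.List.pyGetD xs (k : Int) d) = xs.take n := by
  apply List.ext_getElem
  · simp; omega
  · intro i h1 h2
    simp only [List.getElem_map, List.getElem_range, PySem.List.pyGetD_natCast, List.getElem_take]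
    have : i < xs.length := by simp at h1; omega
    simp [List.getD_eq_getElem?_getD, List.getElem?_eq_getElem this]

theorem pvRowCount (row : List String) (n : Nat) (hn : (n : Int) ≤ (row.length : Int)) :
    (PySem.List.pyRange 0 (n : Int) 1).countP (fun j => PySem.List.pyGetD row j "" == "c")
    = (row.take n).count "c" := by
  have hmap := pvTakeMap row "" n (by omega)
  rw [PySem.List.pyRange_zero_nat, List.countP_map, ← hmap, List.count_eq_countP, List.countP_map]
  rfl

theorem pvCountEq (field : List (List String)) (size : Int)
    (hpre : Pre_count_coals_and_start_position field size) (hpos : 0 < size) :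
    (((pvPairs size).countP (fun p => pvCell field p == "c") : Int))
    = ((PySem.List.slice field none (some size)).map
        (fun row => ((PySem.List.slice row none (some size)).count "c" : Int))).sum := by
  obtain ⟨n, rfl⟩ : ∃ n : Nat, size = (n : Int) := ⟨size.toNat, (Int.toNat_of_nonneg (le_of_lt hpos)).symm⟩
  obtain ⟨hlen, hrows⟩ := hpre
  have hnf : n ≤ field.length := by exact_mod_cast hlen
  have hfmap := pvTakeMap field [] n hnf
  have hsl : ∀ {α : Type} (xs : List α), PySem.List.slice xs none (some (n : Int)) = xs.take n := by
    intro α xs; rw [PySem.List.slice_to xs (by positivity), Int.toNat_natCast]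
  simp only [hsl]
  rw [← hfmap, List.map_map]
  unfold pvPairs
  rw [List.countP_flatMap, PySem.List.pyRange_zero_nat, List.map_map, Nat.cast_list_sum, List.map_map]
  congr 1
  apply List.map_congr_left
  intro k hk
  rw [List.mem_range] at hk
  have hrow : PySem.List.pyGetD field (k : Int) [] ∈ field.take n := by
    rw [← hfmap]
    exact List.mem_map_of_mem (by simpa using hk)
  have hr := hrows (PySem.List.pyGetD field (k : Int) []) (by simpa using hrow)
  simp only [Function.comp, List.countP_map]
  have := pvRowCount (PySem.List.pyGetD field (k : Int) []) n (by simpa using hr)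
  rw [PySem.List.pyRange_zero_nat, List.countP_map] at this
  exact congrArg Nat.cast this

theorem pvFindSomeFlat {α β γ : Type} (l : List α) (f : α → List β) (g : β → Option γ) :
    (l.flatMap f).findSome? g = l.findSome? (fun a => (f a).findSome? g) := by
  induction l with
  | nil => rfl
  | cons a t ih =>
    rw [List.flatMap_cons, List.findSome?_append, List.findSome?_cons]
    rcases h : (f a).findSome? g with _ | v
    · rw [Option.none_or, ih]
    · simp

theorem pvStartEq (field : List (List String)) (size : Int) :
    (pvPairs size).reverse.findSome? (fun p => if pvCell field p == "s" then some p else none)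
    = (PySem.List.pyRange (size - 1) (-1) (-1)).findSome? (fun i =>
        let row := PySem.List.pyGetD field i []
        (PySem.List.pyRange (size - 1) (-1) (-1)).findSome? (fun j =>
          if PySem.List.pyGetD row j "" == "s" then some (i, j) else none)) := by
  have hrev : PySem.List.pyRange (size - 1) (-1) (-1) = (PySem.List.pyRange 0 size 1).reverse := by
    rw [PySem.List.pyRange_neg_one_eq_reverse]
    norm_num
  rw [hrev]
  unfold pvPairs
  rw [List.reverse_flatMap]
  rw [pvFindSomeFlat]
  congr 1
  funext i
  simp only [Function.comp_def, ← List.map_reverse, List.findSome?_map]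
  rfl

-- ===== VERDICT (by name: the statement is the Claim_ definition above) =====
theorem count_coals_and_start_position_spec : Claim_equal_count_coals_and_start_position := by
  intro field size _ hpre
  unfold Spec_count_coals_and_start_position
  by_cases hpos : size ≤ 0
  · unfold count_coals_and_start_position count_coals_and_start_position_alt
    rw [PySem.List.pyRange_one_eq_nil hpos, if_pos hpos]
    rfl
  · rw [not_le] at hpos
    rw [pvA_char]
    unfold count_coals_and_start_position_alt
    rw [if_neg (by omega)]
    rw [pvCountEq field size hpre hpos, pvStartEq]
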